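-- pv_equiv track=rewrite | github.com/YaushuDev/Syncro | gui/components/profile_data_manager.py | sanitize_profile_name
-- ===== SOURCE A (Python) =====
-- def sanitize_profile_name(name):
--     """Sanitiza el nombre del perfil"""
--     if not name:
--         return ""
--
--     # Limpiar espacios
--     name = name.strip()
--
--     # Reemplazar caracteres problemáticos
--     replacements = {
--         '<': '(', '>': ')', ':': '-', '"': "'", '|': '-',
--         '?': '', '*': '', '\\': '-', '/': '-'
--     }
--
--     for old_char, new_char in replacements.items():
--         name = name.replace(old_char, new_char)
--
--     # Limitar longitud
--     if len(name) > 50: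
--         name = name[:50]
--
--     return name
-- ===== SOURCE B (Python) =====
-- def sanitize_profile_name(name):
--     """Sanitiza el nombre del perfil"""
--     if not name:
--         return ""
--
--     name = name.strip()
--
--     repl = {
--         '<': '(', '>': ')', ':': '-', '"': "'", '|': '-',
--         '?': '', '*': '', '\\': '-', '/': '-'
--     }
--
--     # Single pass: map each character through the table, then truncate.
--     out = ''.join(repl.get(c, c) for c in name)
--
--     if len(out) > 50:
--         out = out[:50]
--
--     return out
-- ===== Notes on version B (the rewrite author's own statement) =====
-- stated objective: idiomatic
-- what changed: Replaces the nine sequential full-string str.replace passes with one single pass that maps each character through a replacement table and joins the results.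
import Mathlib
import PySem

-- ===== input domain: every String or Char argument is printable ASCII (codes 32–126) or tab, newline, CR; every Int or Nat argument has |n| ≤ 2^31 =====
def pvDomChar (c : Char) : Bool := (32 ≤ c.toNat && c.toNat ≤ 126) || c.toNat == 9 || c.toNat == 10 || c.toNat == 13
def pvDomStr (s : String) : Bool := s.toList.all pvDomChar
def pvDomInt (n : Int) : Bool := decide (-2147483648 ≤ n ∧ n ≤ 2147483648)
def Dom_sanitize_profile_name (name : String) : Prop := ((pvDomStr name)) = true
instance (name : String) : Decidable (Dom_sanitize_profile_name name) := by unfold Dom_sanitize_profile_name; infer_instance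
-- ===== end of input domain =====

-- B replaces A's nine sequential full-string replace passes by a single per-character
-- mapping pass through a lookup table; proved to return the same string on all inputs.

-- ===== PORT A =====
def sanitize_profile_name (name : String) : String :=
  if name = "" then ""
  else
    let name1 := PySem.Str.strip name
    let replacements : List (String × String) :=
      [("<", "("), (">", ")"), (":", "-"), ("\"", "'"), ("|", "-"),
       ("?", ""), ("*", ""), ("\\", "-"), ("/", "-")]
    let name2 := replacements.foldl (fun n p => PySem.Str.replace n p.1 p.2) name1
    if 50 < PySem.Str.len name2 then PySem.Str.slice name2 none (some 50) else name2

-- ===== PORT B =====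
def pvRepl : PySem.Dict Char (List Char) :=
  PySem.Dict.ofList
    [('<', ['(']), ('>', [')']), (':', ['-']), ('"', ['\'']), ('|', ['-']),
     ('?', []), ('*', []), ('\\', ['-']), ('/', ['-'])]

def sanitize_profile_name_alt (name : String) : String :=
  if name = "" then ""
  else
    let stripped := PySem.Chars.strip name.toList
    let out := PySem.Chars.join [] (stripped.map (fun c => PySem.Dict.getD pvRepl c [c]))
    if 50 < out.length then String.ofList (PySem.List.slice out none (some 50))
    else String.ofList out

-- ===== PRECONDITION & SPEC =====
def Spec_sanitize_profile_name (name : String) (out : String) : Prop := out = sanitize_profile_name_alt name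
instance (name : String) (out : String) : Decidable (Spec_sanitize_profile_name name out) := by unfold Spec_sanitize_profile_name; infer_instance

-- ===== CLAIM (what is proved, stated in full; the proofs are below) =====
def Claim_equal_sanitize_profile_name : Prop := ∀ (name : String), Dom_sanitize_profile_name name → Spec_sanitize_profile_name name (sanitize_profile_name name)

-- ===== LEMMAS AND PROOFS =====

-- single-char substitution, the elementary pass both programs are built from
def pvSub (k : Char) (r : List Char) : Char → List Char := fun x => if x = k then r else [x]

-- the combined per-character mapping the nine passes amount to
def pvM (c : Char) : List Char :=
  if c = '<' then ['('] else if c = '>' then [')'] else if c = ':' then ['-']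
  else if c = '"' then ['\''] else if c = '|' then ['-'] else if c = '?' then []
  else if c = '*' then [] else if c = '\\' then ['-'] else if c = '/' then ['-'] else [c]

theorem pv_go_single (c : Char) (r : List Char) : ∀ (l : List Char) (fuel : Nat) (acc : List Char),
    l.length ≤ fuel →
    PySem.Chars.replace.go [c] r fuel l acc = acc.reverse ++ l.flatMap (pvSub c r) := by
  intro l
  induction l with
  | nil => intro fuel acc _; cases fuel <;> simp [PySem.Chars.replace.go.eq_def]
  | cons x t ih =>
    intro fuel acc h
    cases fuel with
    | zero => simp at h
    | succ f =>
      rw [PySem.Chars.replace.go.eq_def]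
      simp only [List.isPrefixOf, List.flatMap_cons]
      by_cases hx : x = c
      · subst hx
        simp only [BEq.rfl, Bool.and_true, if_true,
          List.length_singleton, List.drop_one, List.tail_cons]
        rw [ih f (r.reverse ++ acc) (by simp at h; omega)]
        simp [pvSub]
      · have hbe : (c == x) = false := beq_false_of_ne (fun h => hx h.symm)
        simp only [hbe, Bool.false_and, Bool.false_eq_true, if_false]
        rw [ih f (x :: acc) (by simp at h; omega)]
        simp [pvSub, hx]

theorem pv_replace_single (l : List Char) (c : Char) (r : List Char) :
    PySem.Chars.replace l [c] r = l.flatMap (pvSub c r) := by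
  simp [PySem.Chars.replace]
  exact pv_go_single c r l l.length [] le_rfl

-- joining with the empty separator is concatenation
theorem pv_join_nil_flatten (ps : List (List Char)) : PySem.Chars.join [] ps = ps.flatten := by
  induction ps with
  | nil => exact PySem.Chars.join_nil []
  | cons p ps ih =>
    cases ps with
    | nil => simp [PySem.Chars.join_singleton]
    | cons q rest => rw [PySem.Chars.join_cons_cons, ih]; simp

-- the nine single-char passes of A collapse to one pass with pvM
set_option maxHeartbeats 1000000 in
theorem pv_chain (l : List Char) :
    ((((((((l.flatMap (pvSub '<' ['('])).flatMap (pvSub '>' [')'])).flatMap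
      (pvSub ':' ['-'])).flatMap (pvSub '"' ['\''])).flatMap (pvSub '|' ['-'])).flatMap
      (pvSub '?' [])).flatMap (pvSub '*' [])).flatMap (pvSub '\\' ['-'])).flatMap
      (pvSub '/' ['-']) = l.flatMap pvM := by
  simp only [List.flatMap_assoc]
  refine List.flatMap_congr fun x _ => ?_
  by_cases h1 : x = '<'; · subst h1; decide
  by_cases h2 : x = '>'; · subst h2; decide
  by_cases h3 : x = ':'; · subst h3; decide
  by_cases h4 : x = '"'; · subst h4; decide
  by_cases h5 : x = '|'; · subst h5; decide
  by_cases h6 : x = '?'; · subst h6; decide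
  by_cases h7 : x = '*'; · subst h7; decide
  by_cases h8 : x = '\\'; · subst h8; decide
  by_cases h9 : x = '/'; · subst h9; decide
  simp [pvSub, pvM, h1, h2, h3, h4, h5, h6, h7, h8, h9]

-- B's table lookup is the same combined mapping
set_option maxHeartbeats 1000000 in
theorem pv_getD_eq (c : Char) : PySem.Dict.getD pvRepl c [c] = pvM c := by
  by_cases h1 : c = '<'; · subst h1; decide
  by_cases h2 : c = '>'; · subst h2; decide
  by_cases h3 : c = ':'; · subst h3; decide
  by_cases h4 : c = '"'; · subst h4; decide
  by_cases h5 : c = '|'; · subst h5; decide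
  by_cases h6 : c = '?'; · subst h6; decide
  by_cases h7 : c = '*'; · subst h7; decide
  by_cases h8 : c = '\\'; · subst h8; decide
  by_cases h9 : c = '/'; · subst h9; decide
  have hitems : pvRepl.items =
    [('<', ['(']), ('>', [')']), (':', ['-']), ('"', ['\'']), ('|', ['-']),
     ('?', []), ('*', []), ('\\', ['-']), ('/', ['-'])] := by decide
  have k1 : ('<' == c) = false := beq_false_of_ne (fun h => h1 h.symm)
  have k2 : ('>' == c) = false := beq_false_of_ne (fun h => h2 h.symm)
  have k3 : (':' == c) = false := beq_false_of_ne (fun h => h3 h.symm)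
  have k4 : ('"' == c) = false := beq_false_of_ne (fun h => h4 h.symm)
  have k5 : ('|' == c) = false := beq_false_of_ne (fun h => h5 h.symm)
  have k6 : ('?' == c) = false := beq_false_of_ne (fun h => h6 h.symm)
  have k7 : ('*' == c) = false := beq_false_of_ne (fun h => h7 h.symm)
  have k8 : ('\\' == c) = false := beq_false_of_ne (fun h => h8 h.symm)
  have k9 : ('/' == c) = false := beq_false_of_ne (fun h => h9 h.symm)
  simp [PySem.Dict.getD, PySem.Dict.get?, hitems, k1, k2, k3, k4, k5, k6, k7, k8, k9,
    pvM, h1, h2, h3, h4, h5, h6, h7, h8, h9]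

theorem pv_str_eq_of_toList {a b : String} (h : a.toList = b.toList) : a = b := by
  have := congrArg String.ofList h
  rwa [String.ofList_toList, String.ofList_toList] at this

-- ===== VERDICT (by name: the statement is the Claim_ definition above) =====
set_option maxHeartbeats 1000000 in
theorem sanitize_profile_name_spec : Claim_equal_sanitize_profile_name := by
  intro name _
  unfold Spec_sanitize_profile_name sanitize_profile_name sanitize_profile_name_alt
  by_cases hn : name = ""
  · simp [hn]
  · simp only [hn, if_false, List.foldl]
    have hA : (PySem.Str.replace (PySem.Str.replace (PySem.Str.replace (PySem.Str.replace
        (PySem.Str.replace (PySem.Str.replace (PySem.Str.replace (PySem.Str.replace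
        (PySem.Str.replace (PySem.Str.strip name) "<" "(") ">" ")") ":" "-") "\"" "'")
        "|" "-") "?" "") "*" "") "\\" "-") "/" "-").toList
        = (PySem.Chars.strip name.toList).flatMap pvM := by
      simp only [PySem.Str.toList_replace, PySem.Str.toList_strip]
      rw [show ("<" : String).toList = ['<'] from rfl, show ("(" : String).toList = ['('] from rfl,
         show (">" : String).toList = ['>'] from rfl, show (")" : String).toList = [')'] from rfl,
         show (":" : String).toList = [':'] from rfl, show ("-" : String).toList = ['-'] from rfl,
         show ("\"" : String).toList = ['"'] from rfl, show ("'" : String).toList = ['\''] from rfl,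
         show ("|" : String).toList = ['|'] from rfl, show ("?" : String).toList = ['?'] from rfl,
         show ("" : String).toList = [] from rfl, show ("*" : String).toList = ['*'] from rfl,
         show ("\\" : String).toList = ['\\'] from rfl, show ("/" : String).toList = ['/'] from rfl]
      simp only [pv_replace_single]
      exact pv_chain _
    have hB : PySem.Chars.join []
        ((PySem.Chars.strip name.toList).map (fun c => PySem.Dict.getD pvRepl c [c]))
        = (PySem.Chars.strip name.toList).flatMap pvM := by
      rw [pv_join_nil_flatten]
      simp only [pv_getD_eq]
      rw [List.flatten_eq_flatMap]
      simp [List.flatMap_map]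
    rw [hB]
    have hlen : PySem.Str.len (PySem.Str.replace (PySem.Str.replace (PySem.Str.replace
        (PySem.Str.replace (PySem.Str.replace (PySem.Str.replace (PySem.Str.replace
        (PySem.Str.replace (PySem.Str.replace (PySem.Str.strip name) "<" "(") ">" ")")
        ":" "-") "\"" "'") "|" "-") "?" "") "*" "") "\\" "-") "/" "-")
        = (((PySem.Chars.strip name.toList).flatMap pvM).length : Int) := by
      rw [PySem.Str.len_eq, hA]
    rw [hlen]
    split_ifs with h1 h2 h3
    · apply pv_str_eq_of_toList
      rw [PySem.Str.toList_slice, PySem.Chars.slice_eq_listSlice, hA, String.toList_ofList]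
    · exact absurd (by exact_mod_cast h1) h2
    · exact absurd (by exact_mod_cast h3) h1
    · exact pv_str_eq_of_toList (by rw [hA, String.toList_ofList])
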